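-- pv_equiv track=rewrite | github.com/MORAI-Autonomous/MORAI-ADModule | mgeo/lib/mgeo/class_defs/intersection_controller_set_builder.py | __delete_subset
-- ===== SOURCE A (Python) =====
-- from typing import DefaultDict, List, Tuple
--
-- def __delete_subset(intscn_set: List[List[str]]):
--     intscn_list = []
--     deleted = []
--     for i in range(len(intscn_set)):
--         for j in range(len(intscn_set)):
--             if i == j:
--                 continue
--
--             if set(intscn_set[i]).issuperset(set(intscn_set[j])):
--                 deleted.append(j)
--             if set(intscn_set[i]).issubset(set(intscn_set[j])):
--                 deleted.append(i)
--
--     deleted = list(set(deleted))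
--     if len(deleted) == 0:
--         return intscn_set
--
--     for i in range(len(intscn_set)):
--         if i not in deleted:
--             intscn_list.append(intscn_set[i])
--     return intscn_list
-- ===== SOURCE B (Python) =====
-- def __delete_subset(intscn_set):
--     counts = {}
--     for fs in map(frozenset, intscn_set):
--         counts[fs] = counts.get(fs, 0) + 1
--
--     def doomed(s):
--         return counts[s] > 1 or any(t != s and t >= s for t in counts)
--
--     return [x for x in intscn_set if not doomed(frozenset(x))]
-- ===== Notes on version B (the rewrite author's own statement) =====
-- stated objective: faster
-- what changed: B groups the rows by their frozenset in a counting dict built in one pass, dooms a frozenset if it occurs more than once or some other distinct key contains it, and filters rows by that per-frozenset verdict, instead of A's index-pair scan that rebuilds set(x) per comparison, accumulates a deleted-index list and re-filters by index.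
import Mathlib
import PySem

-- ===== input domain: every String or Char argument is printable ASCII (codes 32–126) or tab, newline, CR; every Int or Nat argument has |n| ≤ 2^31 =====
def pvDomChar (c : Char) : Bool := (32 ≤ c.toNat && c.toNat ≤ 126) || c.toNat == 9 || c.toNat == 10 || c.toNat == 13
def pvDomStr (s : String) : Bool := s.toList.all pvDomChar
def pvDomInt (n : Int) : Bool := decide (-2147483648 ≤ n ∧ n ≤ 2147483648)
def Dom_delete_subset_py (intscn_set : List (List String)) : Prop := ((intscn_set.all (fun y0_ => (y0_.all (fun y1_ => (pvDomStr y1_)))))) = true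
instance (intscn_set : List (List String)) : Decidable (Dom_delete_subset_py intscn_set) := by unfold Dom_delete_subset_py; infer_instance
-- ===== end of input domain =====

-- B groups rows by their frozenset in a counting dict and dooms a frozenset that repeats or is
-- contained in another distinct key, instead of A's index-pair scan with a deleted-index list;
-- equal return VALUE (A returns the original list object itself when nothing is deleted, B an equal new list).

-- ===== PORT A =====
def delete_subset_py (intscn_set : List (List String)) : List (List String) :=
  let intscn_list : List (List String) := []
  let deleted : List Int :=
    (PySem.List.pyRange 0 (PySem.List.len intscn_set)).foldl (fun deleted i =>
      (PySem.List.pyRange 0 (PySem.List.len intscn_set)).foldl (fun deleted j =>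
        if i == j then deleted
        else
          let deleted :=
            if PySem.Set.issuperset (PySem.Set.ofList (PySem.List.pyGetD intscn_set i []))
                (PySem.Set.ofList (PySem.List.pyGetD intscn_set j [])) then deleted ++ [j]
            else deleted
          if PySem.Set.issubset (PySem.Set.ofList (PySem.List.pyGetD intscn_set i []))
              (PySem.Set.ofList (PySem.List.pyGetD intscn_set j [])) then deleted ++ [i]
          else deleted)
        deleted) []
  -- list(set(deleted)): consumed only by membership tests below, so Set.ofList is exact
  let deleted2 : PySem.Set Int := PySem.Set.ofList deleted
  if PySem.Set.len deleted2 == 0 then intscn_set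
  else
    (PySem.List.pyRange 0 (PySem.List.len intscn_set)).foldl
      (fun acc i =>
        if !(PySem.Set.contains deleted2 i) then acc ++ [PySem.List.pyGetD intscn_set i []]
        else acc)
      intscn_list

-- ===== PORT B =====
-- frozenset(x) is ported as pvCanon x, the sorted deduplicated element list: a canonical
-- representative, exact because frozenset equality / >= are set equality / superset and the
-- dict is only keyed, looked up and membership-scanned by it (never iterated in hash order).
def pvCanon (x : List String) : List String :=
  PySem.List.sorted (PySem.Set.ofList x) (fun s => s) false

def delete_subset_py_alt (intscn_set : List (List String)) : List (List String) :=
  let counts : PySem.Dict (List String) Int :=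
    (intscn_set.map pvCanon).foldl (fun d fs => d.modify fs 0 (· + 1)) PySem.Dict.empty
  -- counts[s] is total here (s is always a key), so getD is exact
  let doomed : List String → Bool := fun s =>
    counts.getD s 0 > 1 || counts.keys.any (fun t => t != s && PySem.Set.issuperset t s)
  intscn_set.filter (fun x => !doomed (pvCanon x))

-- ===== PRECONDITION & SPEC =====
def Spec_delete_subset_py (intscn_set : List (List String)) (out : List (List String)) : Prop := out = delete_subset_py_alt intscn_set
instance (intscn_set : List (List String)) (out : List (List String)) : Decidable (Spec_delete_subset_py intscn_set out) := by unfold Spec_delete_subset_py; infer_instance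

-- ===== CLAIM (what is proved, stated in full; the proofs are below) =====
def Claim_equal_delete_subset_py : Prop := ∀ (intscn_set : List (List String)), Dom_delete_subset_py intscn_set → Spec_delete_subset_py intscn_set (delete_subset_py intscn_set)

-- ===== LEMMAS AND PROOFS =====

-- element set of row i
def pvSt (s : List (List String)) (i : Int) : PySem.Set String :=
  PySem.Set.ofList (PySem.List.pyGetD s i [])

-- "row i is deleted by A": some other index's set contains it (non-strictly)
abbrev pvDel (s : List (List String)) (x : Int) : Prop :=
  ∃ k ∈ PySem.List.pyRange 0 (PySem.List.len s), k ≠ x ∧ ∀ e ∈ pvSt s x, e ∈ pvSt s k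

-- "canonical set c is doomed by B": its frozenset repeats, or another distinct key contains it
def pvDoom (s : List (List String)) (c : List String) : Prop :=
  1 < (s.map pvCanon).count c ∨ ∃ t ∈ s.map pvCanon, t ≠ c ∧ ∀ e ∈ c, e ∈ t

-- Bool form of pvDoom (so it can sit inside List.filter)
def pvDoomB (s : List (List String)) (c : List String) : Bool :=
  decide (1 < (s.map pvCanon).count c) ||
    (s.map pvCanon).any (fun t => t != c && c.all (fun e => t.contains e))

theorem pv_doomB_iff (s : List (List String)) (c : List String) :
    pvDoomB s c = true ↔ pvDoom s c := by
  simp [pvDoomB, pvDoom, List.any_eq_true, List.all_eq_true]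

-- generic membership through a foldl that only appends
theorem pv_mem_foldl_iff {α β : Type} (f : List α → β → List α) (C : β → α → Prop)
    (hf : ∀ acc j x, x ∈ f acc j ↔ x ∈ acc ∨ C j x) :
    ∀ (l : List β) (acc : List α) (x : α),
      x ∈ l.foldl f acc ↔ x ∈ acc ∨ ∃ j ∈ l, C j x := by
  intro l
  induction l with
  | nil => intro acc x; simp
  | cons a t ih =>
    intro acc x
    simp only [List.foldl_cons, ih, hf, List.mem_cons]
    constructor
    · rintro ((h | h) | ⟨j, hj, hc⟩)
      · exact Or.inl h
      · exact Or.inr ⟨a, Or.inl rfl, h⟩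
      · exact Or.inr ⟨j, Or.inr hj, hc⟩
    · rintro (h | ⟨j, hj | hj, hc⟩)
      · exact Or.inl (Or.inl h)
      · exact Or.inl (Or.inr (hj ▸ hc))
      · exact Or.inr ⟨j, hj, hc⟩

-- membership in A's accumulated deleted list
theorem pv_mem_deleted (s : List (List String)) (x : Int) :
    x ∈ (PySem.List.pyRange 0 (PySem.List.len s)).foldl (fun deleted i =>
        (PySem.List.pyRange 0 (PySem.List.len s)).foldl (fun deleted j =>
          if i == j then deleted
          else
            let deleted :=
              if PySem.Set.issuperset (PySem.Set.ofList (PySem.List.pyGetD s i []))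
                  (PySem.Set.ofList (PySem.List.pyGetD s j [])) then deleted ++ [j]
              else deleted
            if PySem.Set.issubset (PySem.Set.ofList (PySem.List.pyGetD s i []))
                (PySem.Set.ofList (PySem.List.pyGetD s j [])) then deleted ++ [i]
            else deleted)
          deleted) ([] : List Int)
      ↔ x ∈ PySem.List.pyRange 0 (PySem.List.len s) ∧ pvDel s x := by
  have hinner : ∀ (i : Int) (acc : List Int) (x : Int),
      x ∈ (PySem.List.pyRange 0 (PySem.List.len s)).foldl (fun deleted j =>
          if i == j then deleted
          else
            let deleted :=
              if PySem.Set.issuperset (PySem.Set.ofList (PySem.List.pyGetD s i []))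
                  (PySem.Set.ofList (PySem.List.pyGetD s j [])) then deleted ++ [j]
              else deleted
            if PySem.Set.issubset (PySem.Set.ofList (PySem.List.pyGetD s i []))
                (PySem.Set.ofList (PySem.List.pyGetD s j [])) then deleted ++ [i]
            else deleted) acc
        ↔ x ∈ acc ∨ ∃ j ∈ PySem.List.pyRange 0 (PySem.List.len s), i ≠ j ∧
            ((PySem.Set.issuperset (PySem.Set.ofList (PySem.List.pyGetD s i []))
                (PySem.Set.ofList (PySem.List.pyGetD s j [])) = true ∧ x = j) ∨
             (PySem.Set.issubset (PySem.Set.ofList (PySem.List.pyGetD s i []))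
                (PySem.Set.ofList (PySem.List.pyGetD s j [])) = true ∧ x = i)) := by
    intro i acc x
    refine pv_mem_foldl_iff _
      (fun j x => i ≠ j ∧
        ((PySem.Set.issuperset (PySem.Set.ofList (PySem.List.pyGetD s i []))
            (PySem.Set.ofList (PySem.List.pyGetD s j [])) = true ∧ x = j) ∨
         (PySem.Set.issubset (PySem.Set.ofList (PySem.List.pyGetD s i []))
            (PySem.Set.ofList (PySem.List.pyGetD s j [])) = true ∧ x = i))) ?_ _ acc x
    intro acc j x
    by_cases hij : i = j
    · simp [hij]
    · simp only [beq_iff_eq, if_neg hij]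
      split_ifs with h1 h2 h2 <;> simp [h1, h2, hij]
  rw [pv_mem_foldl_iff _ _ (fun acc i x => hinner i acc x)]
  simp only [List.not_mem_nil, false_or]
  constructor
  · rintro ⟨i, hi, j, hj, hij, ⟨hsup, rfl⟩ | ⟨hsub, rfl⟩⟩
    · exact ⟨hj, ⟨i, hi, hij, fun e he => (PySem.Set.issuperset_iff _ _).mp hsup e he⟩⟩
    · exact ⟨hi, ⟨j, hj, Ne.symm hij, fun e he => (PySem.Set.issubset_iff _ _).mp hsub e he⟩⟩
  · rintro ⟨hx, k, hk, hkx, hsub⟩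
    refine ⟨x, hx, k, hk, Ne.symm hkx, Or.inr ⟨?_, rfl⟩⟩
    exact (PySem.Set.issubset_iff _ _).mpr hsub

-- membership test against A's deduplicated deleted set, as a Bool equation
theorem pv_contains_deleted (s : List (List String)) (x : Int) :
    PySem.Set.contains (PySem.Set.ofList ((PySem.List.pyRange 0 (PySem.List.len s)).foldl (fun deleted i =>
        (PySem.List.pyRange 0 (PySem.List.len s)).foldl (fun deleted j =>
          if i == j then deleted
          else
            let deleted :=
              if PySem.Set.issuperset (PySem.Set.ofList (PySem.List.pyGetD s i []))
                  (PySem.Set.ofList (PySem.List.pyGetD s j [])) then deleted ++ [j]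
              else deleted
            if PySem.Set.issubset (PySem.Set.ofList (PySem.List.pyGetD s i []))
                (PySem.Set.ofList (PySem.List.pyGetD s j [])) then deleted ++ [i]
            else deleted)
          deleted) ([] : List Int))) x
      = decide (x ∈ PySem.List.pyRange 0 (PySem.List.len s) ∧ pvDel s x) := by
  have h1 : ∀ t : PySem.Set Int, PySem.Set.contains t x = true ↔ x ∈ t := by
    intro t; simp [PySem.Set.contains]
  rw [Bool.eq_iff_iff, h1, PySem.Set.mem_ofList, decide_eq_true_eq]
  exact pv_mem_deleted s x

-- canonical-form facts
theorem pv_mem_canon (x : List String) (e : String) : e ∈ pvCanon x ↔ e ∈ x := by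
  simp [pvCanon, PySem.List.mem_sorted, PySem.Set.mem_ofList]

theorem pv_canon_eq_iff (x y : List String) :
    pvCanon x = pvCanon y ↔ ∀ e, e ∈ x ↔ e ∈ y := by
  constructor
  · intro h e
    rw [← pv_mem_canon x e, ← pv_mem_canon y e, h]
  · intro h
    unfold pvCanon
    refine PySem.List.sorted_eq_sorted_of_perm _ _ _ (fun a b hab => hab) ?_
    refine (List.perm_ext_iff_of_nodup (PySem.Set.nodup_ofList x) (PySem.Set.nodup_ofList y)).mpr ?_
    intro e
    rw [PySem.Set.mem_ofList, PySem.Set.mem_ofList]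
    exact h e

-- List.count is the same under any two lawful BEq instances
theorem pv_count_beq (c : List String) (l : List (List String)) :
    @List.count _ List.instBEq c l = @List.count _ instBEqOfDecidableEq c l := by
  induction l with
  | nil => rfl
  | cons a t ih =>
    rw [@List.count_cons _ List.instBEq, @List.count_cons _ instBEqOfDecidableEq, ih]
    by_cases h : a = c <;> simp [h]

-- two distinct positions with the same value ↔ count ≥ 2 at a known position
theorem pv_count_two_iff {α : Type} [DecidableEq α] (ys : List α) (n : Nat) (hn : n < ys.length) :
    1 < ys.count ys[n] ↔ ∃ k, ∃ hk : k < ys.length, k ≠ n ∧ ys[k] = ys[n] := by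
  constructor
  · intro h
    obtain ⟨p, q, hpq, hp, hq⟩ :=
      List.duplicate_iff_exists_distinct_get.mp (List.duplicate_iff_two_le_count.mpr h)
    by_cases hpn : (p : Nat) = n
    · exact ⟨q, q.isLt, by omega, by simpa [List.get_eq_getElem] using hq.symm⟩
    · exact ⟨p, p.isLt, hpn, by simpa [List.get_eq_getElem] using hp.symm⟩
  · rintro ⟨k, hk, hkn, hke⟩
    apply List.duplicate_iff_two_le_count.mp
    apply List.duplicate_iff_exists_distinct_get.mpr
    rcases Nat.lt_or_ge k n with h | h
    · exact ⟨⟨k, hk⟩, ⟨n, hn⟩, h, by simp [List.get_eq_getElem, hke], by simp [List.get_eq_getElem]⟩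
    · have hkn' : n < k := by omega
      exact ⟨⟨n, hn⟩, ⟨k, hk⟩, hkn', by simp [List.get_eq_getElem], by simp [List.get_eq_getElem, hke]⟩

-- B's per-frozenset verdict agrees with A's per-index verdict
theorem pv_doom_iff_del (l : List (List String)) (i : Int)
    (hi : i ∈ PySem.List.pyRange 0 (PySem.List.len l)) :
    pvDoom l (pvCanon (PySem.List.pyGetD l i [])) ↔ pvDel l i := by
  have hrange : 0 ≤ i ∧ i < (l.length : Int) := by
    simpa [PySem.List.len, PySem.List.mem_pyRange_one] using hi
  obtain ⟨ni, rfl⟩ : ∃ n : Nat, i = (n : Int) := ⟨i.toNat, by omega⟩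
  have hni_lt : ni < l.length := by omega
  have hgi : PySem.List.pyGetD l (ni : Int) [] = l[ni] := by
    rw [PySem.List.pyGetD_natCast]; simp [List.getD, hni_lt]
  have hmemR : ∀ k : Nat, k < l.length → ((k : Int) ∈ PySem.List.pyRange 0 (PySem.List.len l)) := by
    intro k hk
    simp [PySem.List.len, PySem.List.mem_pyRange_one]; omega
  have hgk : ∀ (k : Nat) (hk : k < l.length), PySem.List.pyGetD l (k : Int) [] = l[k]'hk := by
    intro k hk
    rw [PySem.List.pyGetD_natCast]; simp [List.getD, hk]
  constructor
  · rintro (hcnt | ⟨t, ht, htne, htsup⟩)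
    · -- duplicated frozenset: some other index carries an equal set
      rw [hgi] at hcnt
      have hlen : ni < (l.map pvCanon).length := by simpa using hni_lt
      have hcnt' : 1 < @List.count _ instBEqOfDecidableEq (l.map pvCanon)[ni] (l.map pvCanon) := by
        rw [← pv_count_beq]
        simpa [List.getElem_map] using hcnt
      obtain ⟨k, hk, hkn, hke⟩ := (pv_count_two_iff (l.map pvCanon) ni hlen).mp hcnt'
      have hk' : k < l.length := by simpa using hk
      have hcaneq : pvCanon (l[k]'hk') = pvCanon l[ni] := by simpa [List.getElem_map] using hke
      refine ⟨(k : Int), hmemR k hk', fun h => hkn (by exact_mod_cast h), ?_⟩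
      intro e he
      have he' : e ∈ l[ni] := by simpa [pvSt, PySem.Set.mem_ofList, hgi] using he
      have : e ∈ l[k]'hk' := ((pv_canon_eq_iff _ _).mp hcaneq e).mpr he'
      simpa [pvSt, PySem.Set.mem_ofList, hgk k hk'] using this
    · -- a distinct containing frozenset: its row is at a different index
      obtain ⟨y, hy, rfl⟩ := List.mem_map.mp ht
      obtain ⟨k, hk, hky⟩ := List.mem_iff_getElem.mp hy
      have hkne : k ≠ ni := by
        intro h; subst h
        exact htne (by rw [hgi, hky])
      refine ⟨(k : Int), hmemR k hk, fun h => hkne (by exact_mod_cast h), ?_⟩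
      intro e he
      have he' : e ∈ l[ni] := by simpa [pvSt, PySem.Set.mem_ofList, hgi] using he
      have hec : e ∈ pvCanon (PySem.List.pyGetD l (ni : Int) []) := by
        rw [pv_mem_canon, hgi]; exact he'
      have := htsup e hec
      rw [← hky, pv_mem_canon] at this
      simpa [pvSt, PySem.Set.mem_ofList, hgk k hk] using this
  · rintro ⟨k, hk, hkne, hsub⟩
    have hr : 0 ≤ k ∧ k < (l.length : Int) := by
      simpa [PySem.List.len, PySem.List.mem_pyRange_one] using hk
    obtain ⟨nk, rfl⟩ : ∃ n : Nat, k = (n : Int) := ⟨k.toNat, by omega⟩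
    have hnk_lt : nk < l.length := by omega
    have hnkne : nk ≠ ni := by intro h; apply hkne; omega
    have hsub' : ∀ e ∈ l[ni], e ∈ l[nk]'hnk_lt := by
      intro e he
      have := hsub e (by simpa [pvSt, PySem.Set.mem_ofList, hgi] using he)
      simpa [pvSt, PySem.Set.mem_ofList, hgk nk hnk_lt] using this
    by_cases hcan : pvCanon (l[nk]'hnk_lt) = pvCanon (PySem.List.pyGetD l (ni : Int) [])
    · left
      rw [hgi]
      have hlen : ni < (l.map pvCanon).length := by simpa using hni_lt
      have h2 : 1 < @List.count _ instBEqOfDecidableEq (l.map pvCanon)[ni] (l.map pvCanon) := by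
        apply (pv_count_two_iff (l.map pvCanon) ni hlen).mpr
        refine ⟨nk, by simpa using hnk_lt, hnkne, ?_⟩
        simp only [List.getElem_map]
        rw [hcan, hgi]
      rw [← pv_count_beq] at h2
      simpa [List.getElem_map] using h2
    · right
      rw [hgi] at hcan ⊢
      refine ⟨pvCanon (l[nk]'hnk_lt), List.mem_map.mpr ⟨l[nk]'hnk_lt, List.getElem_mem _, rfl⟩, hcan, ?_⟩
      intro e he
      rw [pv_mem_canon] at he
      rw [pv_mem_canon]
      exact hsub' e he

-- A's index-filter-and-read-back equals a direct filter of the rows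
theorem nat_filter_map (f : List String → Bool) (d : List String) :
    ∀ (l : List (List String)),
    ((List.range l.length).filter (fun k => f (l.getD k d))).map (fun k => l.getD k d) = l.filter f := by
  intro l
  induction l with
  | nil => simp
  | cons a t ih =>
    simp only [List.length_cons, List.range_succ_eq_map, List.filter_cons, List.getD_cons_zero]
    have h1 : List.map (fun k => (a :: t).getD k d)
        (List.filter (fun k => f ((a :: t).getD k d)) (List.map Nat.succ (List.range t.length)))
        = List.filter f t := by
      rw [List.filter_map, List.map_map,
        show ((fun k => f ((a :: t).getD k d)) ∘ Nat.succ) = (fun k => f (t.getD k d)) from funext fun k => by simp,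
        ← ih]
      exact List.map_congr_left (fun k _ => by simp [Function.comp])
    split_ifs with hf
    · rw [List.map_cons, List.getD_cons_zero, h1]
    · exact h1

theorem pv_filter_map_range (f : List String → Bool) (d : List String) (l : List (List String)) :
    ((PySem.List.pyRange 0 (PySem.List.len l) 1).filter (fun i => f (PySem.List.pyGetD l i d))).map (fun i => PySem.List.pyGetD l i d) = l.filter f := by
  rw [PySem.List.pyRange_one]
  have hlen : (PySem.List.len l - 0).toNat = l.length := by simp [PySem.List.len]
  rw [hlen, List.filter_map, List.map_map,
    show ((fun i => f (PySem.List.pyGetD l i d)) ∘ fun k : Nat => (0:Int) + k) = (fun k : Nat => f (l.getD k d)) from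
      funext fun k => by simp [Function.comp, PySem.List.pyGetD_natCast],
    ← nat_filter_map f d l]
  exact List.map_congr_left (fun k _ => by simp [Function.comp, PySem.List.pyGetD_natCast])

-- B's Bool verdict computes pvDoomB
theorem pv_alt_eq_filter (l : List (List String)) :
    delete_subset_py_alt l = l.filter (fun x => !pvDoomB l (pvCanon x)) := by
  unfold delete_subset_py_alt
  refine List.filter_congr ?_
  intro x _
  rw [← PySem.Dict.counter_eq_foldl]
  congr 1
  rw [Bool.eq_iff_iff]
  simp only [Bool.or_eq_true, pvDoomB]
  rw [PySem.Dict.getD_counter, PySem.Dict.keys_counter]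
  constructor
  · rintro (h1 | h2)
    · left
      simp only [gt_iff_lt, decide_eq_true_eq] at h1 ⊢
      exact_mod_cast h1
    · right
      rw [List.any_eq_true] at h2 ⊢
      obtain ⟨t, ht, hcond⟩ := h2
      refine ⟨t, (PySem.Set.mem_ofList _ _).mp ht, ?_⟩
      simp only [Bool.and_eq_true, bne_iff_ne, ne_eq] at hcond ⊢
      refine ⟨hcond.1, ?_⟩
      rw [List.all_eq_true]
      intro e he
      rw [List.contains_iff_mem]
      exact (PySem.Set.issuperset_iff _ _).mp hcond.2 e he
  · rintro (h1 | h2)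
    · left
      simp only [gt_iff_lt, decide_eq_true_eq] at h1 ⊢
      exact_mod_cast h1
    · right
      rw [List.any_eq_true] at h2 ⊢
      obtain ⟨t, ht, hcond⟩ := h2
      refine ⟨t, (PySem.Set.mem_ofList _ _).mpr ht, ?_⟩
      simp only [Bool.and_eq_true, bne_iff_ne, ne_eq] at hcond ⊢
      refine ⟨hcond.1, ?_⟩
      apply (PySem.Set.issuperset_iff _ _).mpr
      intro e he
      have := List.all_eq_true.mp hcond.2 e he
      rwa [List.contains_iff_mem] at this

-- ===== VERDICT (by name: the statement is the Claim_ definition above) =====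
theorem delete_subset_py_spec : Claim_equal_delete_subset_py := by
  intro s _
  show delete_subset_py s = delete_subset_py_alt s
  rw [pv_alt_eq_filter]
  unfold delete_subset_py
  dsimp only
  split_ifs with h0
  · -- nothing deleted: every frozenset is undoomed and the filter keeps everything
    have hempty : ∀ x : Int, x ∉ ((PySem.List.pyRange 0 (PySem.List.len s)).foldl (fun deleted i =>
        (PySem.List.pyRange 0 (PySem.List.len s)).foldl (fun deleted j =>
          if i == j then deleted
          else
            let deleted :=
              if PySem.Set.issuperset (PySem.Set.ofList (PySem.List.pyGetD s i []))
                  (PySem.Set.ofList (PySem.List.pyGetD s j [])) then deleted ++ [j]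
              else deleted
            if PySem.Set.issubset (PySem.Set.ofList (PySem.List.pyGetD s i []))
                (PySem.Set.ofList (PySem.List.pyGetD s j [])) then deleted ++ [i]
            else deleted)
          deleted) ([] : List Int)) := by
      intro x hx
      have hlen0 : PySem.Set.len (PySem.Set.ofList ((PySem.List.pyRange 0 (PySem.List.len s)).foldl (fun deleted i =>
        (PySem.List.pyRange 0 (PySem.List.len s)).foldl (fun deleted j =>
          if i == j then deleted
          else
            let deleted :=
              if PySem.Set.issuperset (PySem.Set.ofList (PySem.List.pyGetD s i []))
                  (PySem.Set.ofList (PySem.List.pyGetD s j [])) then deleted ++ [j]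
              else deleted
            if PySem.Set.issubset (PySem.Set.ofList (PySem.List.pyGetD s i []))
                (PySem.Set.ofList (PySem.List.pyGetD s j [])) then deleted ++ [i]
            else deleted)
          deleted) ([] : List Int))) = 0 := by
        simpa using h0
      have hmem := (PySem.Set.mem_ofList _ x).mpr hx
      have hpos := List.length_pos_of_mem hmem
      rw [PySem.Set.len] at hlen0
      omega
    symm
    apply List.filter_eq_self.mpr
    intro x hxmem
    obtain ⟨ni, hni, hxe⟩ := List.mem_iff_getElem.mp hxmem
    have hiR : (ni : Int) ∈ PySem.List.pyRange 0 (PySem.List.len s) := by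
      simp [PySem.List.len, PySem.List.mem_pyRange_one]; omega
    have hgi : PySem.List.pyGetD s (ni : Int) [] = x := by
      rw [PySem.List.pyGetD_natCast]; simp [List.getD, hni, hxe]
    simp only [Bool.not_eq_eq_eq_not, Bool.not_true]
    rw [← Bool.not_eq_true, pv_doomB_iff]
    intro hdoom
    have hdel : pvDel s (ni : Int) := by
      rw [← pv_doom_iff_del s (ni : Int) hiR]
      rwa [hgi]
    exact hempty (ni : Int) ((pv_mem_deleted s (ni : Int)).mpr ⟨hiR, hdel⟩)
  · -- something deleted: A's second loop is the same filter-map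
    rw [PySem.List.foldl_append_if]
    simp only [List.nil_append]
    rw [← pv_filter_map_range (fun x => !pvDoomB s (pvCanon x)) [] s]
    congr 1
    refine List.filter_congr ?_
    intro i hi
    rw [pv_contains_deleted s i, decide_eq_decide.mpr (and_iff_right hi)]
    rw [Bool.eq_iff_iff]
    simp only [Bool.not_eq_true', ← Bool.not_eq_true, pv_doomB_iff]
    rw [pv_doom_iff_del s i hi]
    simp
    infer_instance
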